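-- pv_equiv track=rewrite | github.com/snemes/kabopan | kbp/entro/sfc.py | split_weights
-- ===== SOURCE A (Python) =====
-- def split_weights(weights):
--     """returns the index of a list of weight, after which the list is split in 'almost equal' halves
--     ie when the difference of cumulated weights of both parts is minimal"""
--     length = len(weights)
--
--     increasing_weights = [sum(weights[:i + 1]) for i in range(length)]
--     decreasing_weights = [sum(weights[i:]) for i in range(length)]
--     differences = [abs(increasing_weights[i] - decreasing_weights[i + 1])
--                    for i in range(length - 1)]
--
--     half_weight = min(differences)
--     half_index = differences.index(min(differences))
--     return half_index
-- ===== SOURCE B (Python) =====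
-- def split_weights(weights):
--     """returns the index of a list of weight, after which the list is split in 'almost equal' halves
--     ie when the difference of cumulated weights of both parts is minimal"""
--     total = sum(weights)
--     prefix = 0
--     best_diff = None
--     best_index = 0
--     for i, w in enumerate(weights[:-1]):
--         prefix += w
--         diff = abs(2 * prefix - total)
--         if best_diff is None or diff < best_diff:
--             best_diff = diff
--             best_index = i
--     return best_index
-- ===== Notes on version B (the rewrite author's own statement) =====
-- stated objective: faster
-- what changed: replaces the quadratic slice-and-sum tables (prefix/suffix sums each rebuilt by summing a slice, then a separate min and index pass) by a single pass that keeps a running prefix sum and tracks the first minimum of |2*prefix-total| on the fly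
import Mathlib
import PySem

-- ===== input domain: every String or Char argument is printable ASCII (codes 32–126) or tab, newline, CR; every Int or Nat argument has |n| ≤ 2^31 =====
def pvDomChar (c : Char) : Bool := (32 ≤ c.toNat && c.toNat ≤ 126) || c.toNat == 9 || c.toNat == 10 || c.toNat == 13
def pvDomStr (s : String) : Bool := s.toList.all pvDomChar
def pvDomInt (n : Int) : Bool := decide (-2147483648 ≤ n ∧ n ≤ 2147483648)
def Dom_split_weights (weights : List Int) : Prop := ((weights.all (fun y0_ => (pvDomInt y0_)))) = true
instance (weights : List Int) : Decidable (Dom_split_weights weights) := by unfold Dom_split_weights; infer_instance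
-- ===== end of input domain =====

-- B replaces A's quadratic slice-and-sum tables by one pass with a running prefix sum and
-- on-the-fly first-argmin of |2*prefix - total| (objective: faster).

-- ===== PORT A =====
def split_weights (weights : List Int) : Int :=
  let length : Int := PySem.List.len weights
  let increasing_weights := (PySem.List.pyRange 0 length 1).map
      (fun i => (PySem.List.slice weights none (some (i + 1))).sum)
  let decreasing_weights := (PySem.List.pyRange 0 length 1).map
      (fun i => (PySem.List.slice weights (some i) none).sum)
  let differences := (PySem.List.pyRange 0 (length - 1) 1).map (fun i =>
      |PySem.List.pyGetD increasing_weights i 0 - PySem.List.pyGetD decreasing_weights (i + 1) 0|)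
  match PySem.List.min? differences (fun x => x) with
  | none => 0  -- min([]) raises ValueError in Python (length < 2); excluded by Pre_
  | some m => ((PySem.List.index? differences m).getD 0 : Int)

-- ===== PORT B =====
-- the loop body of Source B: state (prefix, best_diff, best_index), element (i, w)
def bstep (total : Int) (st : Int × Option Int × Int) (iw : Int × Int) : Int × Option Int × Int :=
  let pfx := st.1 + iw.2
  let diff := |2 * pfx - total|
  match st.2.1 with
  | none => (pfx, some diff, iw.1)
  | some bd => if diff < bd then (pfx, some diff, iw.1) else (pfx, some bd, st.2.2)

def split_weights_alt (weights : List Int) : Int :=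
  let total := weights.sum
  let st := (PySem.List.enumerate (PySem.List.slice weights none (some (-1))) 0).foldl
      (bstep total) (0, none, 0)
  st.2.2

-- ===== PRECONDITION & SPEC =====
-- Pre_ excludes exactly the inputs on which A raises: on len(weights) < 2 'differences' is
-- empty and min([]) raises ValueError.
def Pre_split_weights (weights : List Int) : Prop := 2 ≤ weights.length
instance (weights : List Int) : Decidable (Pre_split_weights weights) := by
  unfold Pre_split_weights; infer_instance
def pvWitness_split_weights : List Int := [1, 2]
def Spec_split_weights (weights : List Int) (out : Int) : Prop := out = split_weights_alt weights
instance (weights : List Int) (out : Int) : Decidable (Spec_split_weights weights out) := by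
  unfold Spec_split_weights; infer_instance

-- ===== CLAIM (what is proved, stated in full; the proofs are below) =====
def Claim_equal_split_weights : Prop := ∀ (weights : List Int), Dom_split_weights weights →
  Pre_split_weights weights → Spec_split_weights weights (split_weights weights)

-- ===== LEMMAS AND PROOFS =====

-- the list of values |2*prefix - T| produced while scanning xs with initial prefix sum p
def gdiffs (T : Int) : Int → List Int → List Int
  | _, [] => []
  | p, w :: xs => |2 * (p + w) - T| :: gdiffs T (p + w) xs

-- first-argmin fold: next index k, best value bd so far at best index bi
def fargmin : List Int → Int → Int → Int → Int
  | [], _, _, bi => bi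
  | d :: ds, k, bd, bi => if d < bd then fargmin ds (k + 1) d k else fargmin ds (k + 1) bd bi

theorem length_gdiffs (T : Int) : ∀ (xs : List Int) (p : Int),
    (gdiffs T p xs).length = xs.length := by
  intro xs; induction xs with
  | nil => intro p; rfl
  | cons w xs ih => intro p; simp [gdiffs, ih]

theorem getElem_gdiffs (T : Int) : ∀ (xs : List Int) (p : Int) (i : Nat) (h : i < xs.length),
    (gdiffs T p xs)[i]'(by rw [length_gdiffs]; exact h) = |2 * (p + (xs.take (i + 1)).sum) - T| := by
  intro xs; induction xs with
  | nil => intro p i h; simp at h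
  | cons w xs ih =>
    intro p i h
    cases i with
    | zero => simp [gdiffs]
    | succ j =>
      have := ih (p + w) j (by simpa using h)
      simpa [gdiffs, add_assoc] using this

-- B's fold over the enumerated tail computes the first-argmin of the gdiffs values
theorem bfold (T : Int) : ∀ (xs : List Int) (k p bd bi : Int),
    ((PySem.List.enumerate xs k).foldl (bstep T) (p, some bd, bi)).2.2
      = fargmin (gdiffs T p xs) k bd bi := by
  intro xs; induction xs with
  | nil => intro k p bd bi; simp [PySem.List.enumerate_nil, gdiffs, fargmin]
  | cons w xs ih =>
    intro k p bd bi
    rw [PySem.List.enumerate_cons]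
    simp only [List.foldl_cons, gdiffs, fargmin, bstep]
    by_cases h : |2 * (p + w) - T| < bd
    · simp only [if_pos h]; exact ih (k + 1) (p + w) _ k
    · simp only [if_neg h]; exact ih (k + 1) (p + w) bd bi

-- the first-argmin fold returns bi unless the list improves on bd, in which case it returns
-- the absolute index of the first occurrence of the minimum
theorem fargmin_char : ∀ (ds : List Int) (k bd bi : Int),
    fargmin ds k bd bi =
      if ds.foldl min bd < bd then k + ((ds.idxOf (ds.foldl min bd) : Nat) : Int) else bi := by
  intro ds; induction ds with
  | nil => intro k bd bi; simp [fargmin]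
  | cons d ds ih =>
    intro k bd bi
    have hle : ds.foldl min d ≤ d := (PySem.List.foldl_min_le ds d).1
    have hle' : ds.foldl min bd ≤ bd := (PySem.List.foldl_min_le ds bd).1
    by_cases h : d < bd
    · have hmin : min bd d = d := min_eq_right h.le
      simp only [fargmin, if_pos h, List.foldl_cons, hmin, ih]
      by_cases h2 : ds.foldl min d < d
      · have hne : (d == ds.foldl min d) = false := by simp; omega
        rw [if_pos h2, if_pos (show ds.foldl min d < bd by omega)]
        simp only [List.idxOf_cons, hne, cond_false]
        push_cast; ring
      · have heq : ds.foldl min d = d := le_antisymm hle (not_lt.mp h2)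
        rw [if_neg h2, heq, if_pos h]
        simp
    · have hmin : min bd d = bd := min_eq_left (not_lt.mp h)
      simp only [fargmin, if_neg h, List.foldl_cons, hmin, ih]
      by_cases h2 : ds.foldl min bd < bd
      · have hne : (d == ds.foldl min bd) = false := by simp; omega
        rw [if_pos h2, if_pos h2]
        simp only [List.idxOf_cons, hne, cond_false]
        push_cast; ring
      · rw [if_neg h2, if_neg h2]

theorem idxOf?_of_mem (l : List Int) (a : Int) : a ∈ l → l.idxOf? a = some (l.idxOf a) := by
  induction l with
  | nil => intro h; simp at h
  | cons b l ih =>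
    intro h
    by_cases hba : b = a
    · simp [List.idxOf?_cons, hba]
    · have hm : a ∈ l := by cases h with | head => exact absurd rfl hba | tail _ h => exact h
      simp [List.idxOf?_cons, hba, ih hm]

-- A's 'differences' list is exactly gdiffs of the tail
theorem differences_eq (weights : List Int) (h : 1 ≤ weights.length) :
    (PySem.List.pyRange 0 ((PySem.List.len weights) - 1) 1).map (fun i =>
        |PySem.List.pyGetD ((PySem.List.pyRange 0 (PySem.List.len weights) 1).map
            (fun i => (PySem.List.slice weights none (some (i + 1))).sum)) i 0
          - PySem.List.pyGetD ((PySem.List.pyRange 0 (PySem.List.len weights) 1).map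
            (fun i => (PySem.List.slice weights (some i) none).sum)) (i + 1) 0|)
      = gdiffs weights.sum 0 weights.dropLast := by
  apply List.ext_getElem
  · simp [PySem.List.length_pyRange_one, length_gdiffs, PySem.List.len_eq]
  · intro i h1 h2
    have hi : i < weights.length - 1 := by
      simpa [PySem.List.length_pyRange_one, PySem.List.len_eq] using h1
    rw [List.getElem_map, PySem.List.getElem_pyRange_one]
    rw [getElem_gdiffs weights.sum weights.dropLast 0 i
      (by simpa [List.length_dropLast] using hi)]
    have hcast : (0 : Int) + (i : Int) = ((i : Nat) : Int) := by ring
    rw [hcast]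
    rw [PySem.List.pyGetD_map_pyRange_of_nonneg _ _ _ _ (by positivity)
      (by simp [PySem.List.len_eq]; omega)]
    have hcast2 : ((i : Nat) : Int) + 1 = (((i + 1 : Nat)) : Int) := by push_cast; ring
    rw [hcast2]
    rw [PySem.List.pyGetD_map_pyRange_of_nonneg _ _ _ _ (by positivity)
      (by simp [PySem.List.len_eq]; omega)]
    rw [PySem.List.slice_to_natCast, PySem.List.slice_from_natCast]
    have htake : weights.dropLast.take (i + 1) = weights.take (i + 1) := by
      rw [List.dropLast_eq_take, List.take_take]
      congr 1; omega
    rw [htake]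
    have hsum : (weights.take (i + 1)).sum + (weights.drop (i + 1)).sum = weights.sum :=
      List.sum_take_add_sum_drop weights (i + 1)
    have hkey : 2 * ((0 : Int) + (weights.take (i + 1)).sum) - weights.sum
        = (weights.take (i + 1)).sum - (weights.drop (i + 1)).sum := by omega
    rw [hkey]

-- ===== VERDICT (by name: the statement is the Claim_ definition above) =====
theorem split_weights_spec : Claim_equal_split_weights := by
  unfold Claim_equal_split_weights
  intro weights _ hpre
  have hpre' : 2 ≤ weights.length := hpre
  unfold Spec_split_weights split_weights split_weights_alt
  dsimp only
  obtain ⟨w0, ws, hdl⟩ := List.ne_nil_iff_exists_cons.mp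
    (show weights.dropLast ≠ [] by
      intro hc
      have := congrArg List.length hc
      simp [List.length_dropLast] at this
      omega)
  rw [differences_eq weights (by omega), PySem.List.slice_to_neg_one, hdl]
  simp only [gdiffs, PySem.List.enumerate_cons, List.foldl_cons, bstep]
  rw [bfold]
  rw [PySem.List.min?_id_cons]
  set d0 := |2 * (0 + w0) - weights.sum| with hd0
  set rest := gdiffs weights.sum (0 + w0) ws with hrest
  set m := rest.foldl min d0 with hm
  have hmem : m ∈ d0 :: rest := by
    rcases PySem.List.foldl_min_mem rest d0 with h | h
    · rw [hm, h]; exact List.mem_cons_self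
    · exact List.mem_cons_of_mem _ h
  dsimp only
  rw [PySem.List.index?_eq_idxOf?, idxOf?_of_mem _ _ hmem]
  simp only [Option.getD_some]
  rw [fargmin_char]
  have hle : m ≤ d0 := (PySem.List.foldl_min_le rest d0).1
  by_cases hlt : m < d0
  · have hne : (d0 == m) = false := by simp; omega
    rw [if_pos hlt]
    simp only [List.idxOf_cons, hne, cond_false]
    push_cast; ring
  · have heq : m = d0 := le_antisymm hle (not_lt.mp hlt)
    rw [if_neg hlt, heq]
    simp
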